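-- pv_equiv track=rewrite | github.com/lun-ai/sequential-teaching | data/analysis/eval_trace.py | sim_algo_hist
-- ===== SOURCE A (Python) =====
-- def sim_algo_hist(candidates_lists):
--     categories = {"BS": 0, "DS": 0, "IS": 0, "MS": 0, "QS": 0}
--
--     for c in candidates_lists:
--         if c != []:
--             if len(list(filter(lambda x: x[0] in ["botup_msort_left_front", "botup_msort_right_front",
--                                                   "botup_msort_left_back",
--                                                   "botup_msort_right_back", "msort_left_front", "msort_left_back",
--                                                   "msort_left_back",
--                                                   "msort_right_back"], c))) == len(c):
--                 categories["MS"] += 1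
--             elif len(list(filter(lambda x: x[0] in ["isort_front", "isort_back"], c))) == len(c):
--                 categories["IS"] += 1
--             elif len(list(filter(lambda x: x[0] in ["qsort_first", "qsort_mid", "qsort_last"], c))) == len(c):
--                 categories["QS"] += 1
--             elif len(list(filter(lambda x: x[0] in ["bubsort_front", "bubsort_back"], c))) == len(c):
--                 categories["BS"] += 1
--             elif len(list(filter(lambda x: x[0] in ["dict_sort_front", "dict_sort_back"], c))) == len(c):
--                 categories["DS"] += 1
--
--     return categories
-- ===== SOURCE B (Python) =====
-- NAME2CAT = {
--     "botup_msort_left_front": "MS", "botup_msort_right_front": "MS",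
--     "botup_msort_left_back": "MS", "botup_msort_right_back": "MS",
--     "msort_left_front": "MS", "msort_left_back": "MS", "msort_right_back": "MS",
--     "isort_front": "IS", "isort_back": "IS",
--     "qsort_first": "QS", "qsort_mid": "QS", "qsort_last": "QS",
--     "bubsort_front": "BS", "bubsort_back": "BS",
--     "dict_sort_front": "DS", "dict_sort_back": "DS",
-- }
--
-- def sim_algo_hist(candidates_lists):
--     categories = {"BS": 0, "DS": 0, "IS": 0, "MS": 0, "QS": 0}
--     for c in candidates_lists:
--         if not c:
--             continue
--         cat = NAME2CAT.get(c[0][0])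
--         if cat is not None and all(NAME2CAT.get(x[0]) == cat for x in c):
--             categories[cat] += 1
--     return categories
-- ===== Notes on version B (the rewrite author's own statement) =====
-- stated objective: faster
-- what changed: Replaces the five per-category filter-and-count passes over each candidate list with a single name-to-category lookup table: classify the head once and check all elements agree in one pass.
import Mathlib
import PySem

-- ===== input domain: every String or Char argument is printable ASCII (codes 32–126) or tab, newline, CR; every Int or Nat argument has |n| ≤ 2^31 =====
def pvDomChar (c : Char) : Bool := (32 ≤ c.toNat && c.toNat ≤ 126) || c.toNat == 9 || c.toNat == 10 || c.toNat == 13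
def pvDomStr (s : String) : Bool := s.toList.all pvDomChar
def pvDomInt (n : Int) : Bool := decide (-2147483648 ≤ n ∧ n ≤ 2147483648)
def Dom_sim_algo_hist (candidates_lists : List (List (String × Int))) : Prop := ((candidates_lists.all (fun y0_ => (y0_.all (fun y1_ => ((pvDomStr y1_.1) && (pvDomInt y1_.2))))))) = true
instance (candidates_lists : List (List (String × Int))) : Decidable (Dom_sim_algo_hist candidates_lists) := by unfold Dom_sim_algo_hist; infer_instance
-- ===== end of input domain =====

-- B replaces A's five per-category filter-and-count passes over each candidate list by a
-- single name-to-category lookup table and one all-agree scan per list (simpler decomposition).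


-- ===== PORT A =====
def pvMsNames : List String := ["botup_msort_left_front", "botup_msort_right_front", "botup_msort_left_back", "botup_msort_right_back", "msort_left_front", "msort_left_back", "msort_left_back", "msort_right_back"]
def pvIsNames : List String := ["isort_front", "isort_back"]
def pvQsNames : List String := ["qsort_first", "qsort_mid", "qsort_last"]
def pvBsNames : List String := ["bubsort_front", "bubsort_back"]
def pvDsNames : List String := ["dict_sort_front", "dict_sort_back"]

-- the loop body of A: five filter-and-count passes tried in order ('categories[k] += 1' is Dict.modify; the key is always present)
def pvStepA (d : PySem.Dict String Int) (c : List (String × Int)) : PySem.Dict String Int :=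
  if c ≠ [] then
    if (c.filter (fun x => pvMsNames.contains x.1)).length = c.length then d.modify "MS" 0 (· + 1)
    else if (c.filter (fun x => pvIsNames.contains x.1)).length = c.length then d.modify "IS" 0 (· + 1)
    else if (c.filter (fun x => pvQsNames.contains x.1)).length = c.length then d.modify "QS" 0 (· + 1)
    else if (c.filter (fun x => pvBsNames.contains x.1)).length = c.length then d.modify "BS" 0 (· + 1)
    else if (c.filter (fun x => pvDsNames.contains x.1)).length = c.length then d.modify "DS" 0 (· + 1)
    else d
  else d

def sim_algo_hist (candidates_lists : List (List (String × Int))) : List (String × Int) :=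
  (candidates_lists.foldl pvStepA
    (PySem.Dict.ofList [("BS", 0), ("DS", 0), ("IS", 0), ("MS", 0), ("QS", 0)])).items

-- ===== PORT B =====
def pvName2Cat : PySem.Dict String String :=
  PySem.Dict.mk
    [("botup_msort_left_front", "MS"), ("botup_msort_right_front", "MS"),
     ("botup_msort_left_back", "MS"), ("botup_msort_right_back", "MS"),
     ("msort_left_front", "MS"), ("msort_left_back", "MS"), ("msort_right_back", "MS"),
     ("isort_front", "IS"), ("isort_back", "IS"),
     ("qsort_first", "QS"), ("qsort_mid", "QS"), ("qsort_last", "QS"),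
     ("bubsort_front", "BS"), ("bubsort_back", "BS"),
     ("dict_sort_front", "DS"), ("dict_sort_back", "DS")]

-- the loop body of B: classify the head via the table, then one all-agree scan
def pvStepB (d : PySem.Dict String Int) (c : List (String × Int)) : PySem.Dict String Int :=
  match c with
  | [] => d
  | x :: _ =>
    match pvName2Cat.get? x.1 with
    | none => d
    | some cat =>
      if c.all (fun y => pvName2Cat.get? y.1 == some cat) then d.modify cat 0 (· + 1) else d

def sim_algo_hist_alt (candidates_lists : List (List (String × Int))) : List (String × Int) :=
  (candidates_lists.foldl pvStepB
    (PySem.Dict.ofList [("BS", 0), ("DS", 0), ("IS", 0), ("MS", 0), ("QS", 0)])).items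

-- ===== PRECONDITION & SPEC =====
def Spec_sim_algo_hist (candidates_lists : List (List (String × Int))) (out : List (String × Int)) : Prop := out = sim_algo_hist_alt candidates_lists
instance (candidates_lists : List (List (String × Int))) (out : List (String × Int)) : Decidable (Spec_sim_algo_hist candidates_lists out) := by unfold Spec_sim_algo_hist; infer_instance

-- ===== CLAIM (what is proved, stated in full; the proofs are below) =====
def Claim_equal_sim_algo_hist : Prop := ∀ (candidates_lists : List (List (String × Int))), Dom_sim_algo_hist candidates_lists → Spec_sim_algo_hist candidates_lists (sim_algo_hist candidates_lists)

-- ===== LEMMAS AND PROOFS =====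

-- B's lookup table agrees with A's five membership lists, tried in A's order
set_option maxRecDepth 4096 in
set_option maxHeartbeats 2000000 in
theorem get?_tab (s : String) : pvName2Cat.get? s =
    (if pvMsNames.contains s then some "MS"
     else if pvIsNames.contains s then some "IS"
     else if pvQsNames.contains s then some "QS"
     else if pvBsNames.contains s then some "BS"
     else if pvDsNames.contains s then some "DS"
     else none) := by
  by_cases hm : s ∈ pvMsNames
  · simp [pvMsNames] at hm
    rcases hm with rfl|rfl|rfl|rfl|rfl|rfl|rfl <;> exact by decide
  · by_cases hi : s ∈ pvIsNames
    · simp [pvIsNames] at hi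
      rcases hi with rfl|rfl <;> exact by decide
    · by_cases hq : s ∈ pvQsNames
      · simp [pvQsNames] at hq
        rcases hq with rfl|rfl|rfl <;> exact by decide
      · by_cases hb : s ∈ pvBsNames
        · simp [pvBsNames] at hb
          rcases hb with rfl|rfl <;> exact by decide
        · by_cases hd : s ∈ pvDsNames
          · simp [pvDsNames] at hd
            rcases hd with rfl|rfl <;> exact by decide
          · have hnone : pvName2Cat.get? s = none := by
              simp only [pvName2Cat, PySem.Dict.get?_mk_cons, beq_iff_eq]
              rw [if_neg (fun h : ("botup_msort_left_front" : String) = s => hm (h ▸ (by decide : ("botup_msort_left_front" : String) ∈ pvMsNames))),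
                if_neg (fun h : ("botup_msort_right_front" : String) = s => hm (h ▸ (by decide : ("botup_msort_right_front" : String) ∈ pvMsNames))),
                if_neg (fun h : ("botup_msort_left_back" : String) = s => hm (h ▸ (by decide : ("botup_msort_left_back" : String) ∈ pvMsNames))),
                if_neg (fun h : ("botup_msort_right_back" : String) = s => hm (h ▸ (by decide : ("botup_msort_right_back" : String) ∈ pvMsNames))),
                if_neg (fun h : ("msort_left_front" : String) = s => hm (h ▸ (by decide : ("msort_left_front" : String) ∈ pvMsNames))),
                if_neg (fun h : ("msort_left_back" : String) = s => hm (h ▸ (by decide : ("msort_left_back" : String) ∈ pvMsNames))),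
                if_neg (fun h : ("msort_right_back" : String) = s => hm (h ▸ (by decide : ("msort_right_back" : String) ∈ pvMsNames))),
                if_neg (fun h : ("isort_front" : String) = s => hi (h ▸ (by decide : ("isort_front" : String) ∈ pvIsNames))),
                if_neg (fun h : ("isort_back" : String) = s => hi (h ▸ (by decide : ("isort_back" : String) ∈ pvIsNames))),
                if_neg (fun h : ("qsort_first" : String) = s => hq (h ▸ (by decide : ("qsort_first" : String) ∈ pvQsNames))),
                if_neg (fun h : ("qsort_mid" : String) = s => hq (h ▸ (by decide : ("qsort_mid" : String) ∈ pvQsNames))),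
                if_neg (fun h : ("qsort_last" : String) = s => hq (h ▸ (by decide : ("qsort_last" : String) ∈ pvQsNames))),
                if_neg (fun h : ("bubsort_front" : String) = s => hb (h ▸ (by decide : ("bubsort_front" : String) ∈ pvBsNames))),
                if_neg (fun h : ("bubsort_back" : String) = s => hb (h ▸ (by decide : ("bubsort_back" : String) ∈ pvBsNames))),
                if_neg (fun h : ("dict_sort_front" : String) = s => hd (h ▸ (by decide : ("dict_sort_front" : String) ∈ pvDsNames))),
                if_neg (fun h : ("dict_sort_back" : String) = s => hd (h ▸ (by decide : ("dict_sort_back" : String) ∈ pvDsNames)))]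
              rfl
            rw [hnone]
            simp [hm, hi, hq, hb, hd]

-- the five membership lists are pairwise disjoint (checked literal by literal)
theorem disj_ms (s : String) (h : s ∈ pvMsNames) : s ∉ pvIsNames ∧ s ∉ pvQsNames ∧ s ∉ pvBsNames ∧ s ∉ pvDsNames := by
  simp [pvMsNames] at h
  rcases h with rfl|rfl|rfl|rfl|rfl|rfl|rfl <;> exact by decide

theorem disj_is (s : String) (h : s ∈ pvIsNames) : s ∉ pvQsNames ∧ s ∉ pvBsNames ∧ s ∉ pvDsNames := by
  simp [pvIsNames] at h
  rcases h with rfl|rfl <;> exact by decide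

theorem disj_qs (s : String) (h : s ∈ pvQsNames) : s ∉ pvBsNames ∧ s ∉ pvDsNames := by
  simp [pvQsNames] at h
  rcases h with rfl|rfl|rfl <;> exact by decide

theorem disj_bs (s : String) (h : s ∈ pvBsNames) : s ∉ pvDsNames := by
  simp [pvBsNames] at h
  rcases h with rfl|rfl <;> exact by decide

-- pointwise: B's per-element test is A's per-element membership test
theorem eq_ms (s : String) : (pvName2Cat.get? s = some "MS") ↔ s ∈ pvMsNames := by
  by_cases h : s ∈ pvMsNames
  · have h' := h
    simp [pvMsNames] at h
    rcases h with rfl|rfl|rfl|rfl|rfl|rfl|rfl <;> exact by decide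
  · rw [get?_tab]
    split_ifs <;> simp_all

theorem eq_is (s : String) : (pvName2Cat.get? s = some "IS") ↔ s ∈ pvIsNames := by
  by_cases h : s ∈ pvIsNames
  · have h' := h
    simp [pvIsNames] at h
    rcases h with rfl|rfl <;> exact by decide
  · rw [get?_tab]
    split_ifs <;> simp_all

theorem eq_qs (s : String) : (pvName2Cat.get? s = some "QS") ↔ s ∈ pvQsNames := by
  by_cases h : s ∈ pvQsNames
  · have h' := h
    simp [pvQsNames] at h
    rcases h with rfl|rfl|rfl <;> exact by decide
  · rw [get?_tab]
    split_ifs <;> simp_all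

theorem eq_bs (s : String) : (pvName2Cat.get? s = some "BS") ↔ s ∈ pvBsNames := by
  by_cases h : s ∈ pvBsNames
  · have h' := h
    simp [pvBsNames] at h
    rcases h with rfl|rfl <;> exact by decide
  · rw [get?_tab]
    split_ifs <;> simp_all

theorem eq_ds (s : String) : (pvName2Cat.get? s = some "DS") ↔ s ∈ pvDsNames := by
  by_cases h : s ∈ pvDsNames
  · have h' := h
    simp [pvDsNames] at h
    rcases h with rfl|rfl <;> exact by decide
  · rw [get?_tab]
    split_ifs <;> simp_all

-- a filter of xs is never longer than xs (rules out the dead branches split_ifs leaves)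
theorem flen_succ (p : String × Int → Bool) (xs : List (String × Int)) :
    ¬ (List.filter p xs).length = xs.length + 1 := by
  have := List.length_filter_le p xs
  omega

-- a uniform list cannot also contain an element outside the set
theorem contra_all_ex {L : List String} {xs : List (String × Int)}
    (h1 : ∀ (a : String) (b : Int), (a, b) ∈ xs → a ∈ L)
    (h2 : ∃ t, (∃ u, (t, u) ∈ xs) ∧ t ∉ L) : False := by
  obtain ⟨t, ⟨u, htu⟩, hnt⟩ := h2
  exact hnt (h1 t u htu)

theorem step_eq (d : PySem.Dict String Int) (c : List (String × Int)) :
    pvStepA d c = pvStepB d c := by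
  cases c with
  | nil => rfl
  | cons x xs =>
    by_cases hm : x.1 ∈ pvMsNames
    ·
      obtain ⟨n1, n2, n3, n4⟩ := disj_ms x.1 hm
      have hx : pvName2Cat.get? x.1 = some "MS" := by rw [get?_tab]; simp [hm]
      simp only [pvStepA, pvStepB, hx]
      simp [eq_ms, hm, n1, n2, n3, n4]
      all_goals try (split_ifs <;> simp_all [flen_succ, eq_ms])
      all_goals first
      | rfl
      | (exfalso; exact contra_all_ex (by assumption) (by assumption))
    · by_cases hi : x.1 ∈ pvIsNames
      ·
        obtain ⟨n2, n3, n4⟩ := disj_is x.1 hi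
        have hx : pvName2Cat.get? x.1 = some "IS" := by rw [get?_tab]; simp [hm, hi]
        simp only [pvStepA, pvStepB, hx]
        simp [eq_is, hm, hi, n2, n3, n4]
        all_goals try (split_ifs <;> simp_all [flen_succ, eq_is])
        all_goals first
        | rfl
        | (exfalso; exact contra_all_ex (by assumption) (by assumption))
      · by_cases hq : x.1 ∈ pvQsNames
        ·
          obtain ⟨n3, n4⟩ := disj_qs x.1 hq
          have hx : pvName2Cat.get? x.1 = some "QS" := by rw [get?_tab]; simp [hm, hi, hq]
          simp only [pvStepA, pvStepB, hx]
          simp [eq_qs, hm, hi, hq, n3, n4]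
          all_goals try (split_ifs <;> simp_all [flen_succ, eq_qs])
          all_goals first
          | rfl
          | (exfalso; exact contra_all_ex (by assumption) (by assumption))
        · by_cases hb : x.1 ∈ pvBsNames
          ·
            have n4 := disj_bs x.1 hb
            have hx : pvName2Cat.get? x.1 = some "BS" := by rw [get?_tab]; simp [hm, hi, hq, hb]
            simp only [pvStepA, pvStepB, hx]
            simp [eq_bs, hm, hi, hq, hb, n4]
            all_goals try (split_ifs <;> simp_all [flen_succ, eq_bs])
            all_goals first
            | rfl
            | (exfalso; exact contra_all_ex (by assumption) (by assumption))
          · by_cases hd : x.1 ∈ pvDsNames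
            ·
              have hx : pvName2Cat.get? x.1 = some "DS" := by rw [get?_tab]; simp [hm, hi, hq, hb, hd]
              simp only [pvStepA, pvStepB, hx]
              simp [eq_ds, hm, hi, hq, hb, hd]
              all_goals try (split_ifs <;> simp_all [flen_succ, eq_ds])
              all_goals first
              | rfl
              | (exfalso; exact contra_all_ex (by assumption) (by assumption))
            · have hx : pvName2Cat.get? x.1 = none := by rw [get?_tab]; simp [hm, hi, hq, hb, hd]
              simp only [pvStepA, pvStepB, hx]
              simp [flen_succ, hm, hi, hq, hb, hd]

-- ===== VERDICT (by name: the statement is the Claim_ definition above) =====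
theorem sim_algo_hist_spec : Claim_equal_sim_algo_hist := by
  intro cl _
  unfold Spec_sim_algo_hist sim_algo_hist sim_algo_hist_alt
  have hstep : pvStepA = pvStepB := funext fun d => funext fun c => step_eq d c
  rw [hstep]
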